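-- pv_equiv track=rewrite | github.com/anton31kah/AdventOfCode | src/year2023/day18/part2.py | create_wall
-- ===== SOURCE A (Python) =====
-- def get_diff(direction):
--     match direction:
--         case 'D':
--             return (0, 1)
--         case 'U':
--             return (0, -1)
--         case 'L':
--             return (-1, 0)
--         case 'R':
--             return (1, 0)
--     raise ValueError("invalid direction " + direction)
--
-- def create_wall(instructions):
--     wall = [(0,0)]
--     current = (0,0)
--
--     for instruction in instructions:
--         direction, meters, color = instruction
--         dx, dy = get_diff(direction)
--         for i in range(meters):
--             x, y = current
--             new = x + dx, y + dy
--             wall.append(new)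
--             current = new
--
--     return wall
-- ===== SOURCE B (Python) =====
-- def get_diff(direction):
--     match direction:
--         case 'D':
--             return (0, 1)
--         case 'U':
--             return (0, -1)
--         case 'L':
--             return (-1, 0)
--         case 'R':
--             return (1, 0)
--     raise ValueError("invalid direction " + direction)
--
-- def create_wall(instructions):
--     # Phase 1: flatten all instructions into one flat list of per-step deltas.
--     deltas = []
--     for direction, meters, _color in instructions:
--         deltas += [get_diff(direction)] * meters
--     # Phase 2: one flat prefix-sum pass over the deltas.
--     wall = [(0, 0)]
--     for dx, dy in deltas:
--         x, y = wall[-1]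
--         wall.append((x + dx, y + dy))
--     return wall
-- ===== Notes on version B (the rewrite author's own statement) =====
-- stated objective: alternative
-- what changed: B first flattens the instructions into one flat list of per-step delta vectors and then builds the wall in a single prefix-sum pass over that list, replacing A's nested per-segment loop with its mutable `current` variable.
import Mathlib
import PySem

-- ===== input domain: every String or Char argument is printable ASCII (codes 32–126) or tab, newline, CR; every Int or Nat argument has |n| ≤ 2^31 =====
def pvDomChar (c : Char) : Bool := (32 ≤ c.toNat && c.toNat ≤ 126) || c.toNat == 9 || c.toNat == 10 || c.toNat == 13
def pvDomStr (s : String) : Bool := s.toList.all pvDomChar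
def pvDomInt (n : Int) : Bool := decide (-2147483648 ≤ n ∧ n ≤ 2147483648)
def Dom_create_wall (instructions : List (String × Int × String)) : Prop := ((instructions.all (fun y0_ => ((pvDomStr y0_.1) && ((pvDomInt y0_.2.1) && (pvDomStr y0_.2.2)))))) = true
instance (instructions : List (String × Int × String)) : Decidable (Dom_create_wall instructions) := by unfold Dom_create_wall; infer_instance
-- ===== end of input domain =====

-- B builds the same wall by flattening the instructions into a flat delta list and prefix-summing it (alternative decomposition, same cost).
-- A mutates nothing; equivalence is about the return value.

-- ===== PORT A =====
-- get_diff: none = ValueError (excluded by Pre_); shared module helper of both A and B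
def get_diff (direction : String) : Option (Int × Int) :=
  if direction = "D" then some (0, 1)
  else if direction = "U" then some (0, -1)
  else if direction = "L" then some (-1, 0)
  else if direction = "R" then some (1, 0)
  else none

-- inner 'for i in range(meters)' loop of A: state = (wall, current)
def wallLoop (st : List (Int × Int) × (Int × Int)) (d : Int × Int) : Nat → List (Int × Int) × (Int × Int)
  | 0 => st
  | n + 1 =>
    let new := (st.2.1 + d.1, st.2.2 + d.2)
    wallLoop (st.1 ++ [new], new) d n

def create_wall (instructions : List (String × Int × String)) : List (Int × Int) :=
  (instructions.foldl
    (fun st ins =>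
      let d := (get_diff ins.1).getD (0, 0)   -- default never reached under Pre_
      wallLoop st d ins.2.1.toNat)
    ([(0, 0)], (0, 0))).1

-- ===== PORT B =====
-- phase 1 of B: the flat list of per-step deltas
def deltasOf (instructions : List (String × Int × String)) : List (Int × Int) :=
  instructions.flatMap (fun ins => List.replicate ins.2.1.toNat ((get_diff ins.1).getD (0, 0)))

-- phase 2 of B: 'wall.append(wall[-1] + delta)' loop
def scanLoop (wall : List (Int × Int)) : List (Int × Int) → List (Int × Int)
  | [] => wall
  | q :: qs =>
    let last := (PySem.List.pyGet? wall (-1)).getD (0, 0)   -- wall[-1]; wall is never empty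
    scanLoop (wall ++ [(last.1 + q.1, last.2 + q.2)]) qs

def create_wall_alt (instructions : List (String × Int × String)) : List (Int × Int) :=
  scanLoop [(0, 0)] (deltasOf instructions)

-- ===== PRECONDITION & SPEC =====
-- Pre_ excludes exactly the inputs on which Python A raises ValueError: some instruction with an invalid direction letter.
def Pre_create_wall (instructions : List (String × Int × String)) : Prop :=
  ∀ ins ∈ instructions, ins.1 = "D" ∨ ins.1 = "U" ∨ ins.1 = "L" ∨ ins.1 = "R"
instance (instructions : List (String × Int × String)) : Decidable (Pre_create_wall instructions) := by unfold Pre_create_wall; infer_instance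
def pvWitness_create_wall : (List (String × Int × String)) := [("D", 2, "#70c710"), ("R", 1, "#0dc571")]


def Spec_create_wall (instructions : List (String × Int × String)) (out : List (Int × Int)) : Prop := out = create_wall_alt instructions
instance (instructions : List (String × Int × String)) (out : List (Int × Int)) : Decidable (Spec_create_wall instructions out) := by unfold Spec_create_wall; infer_instance

-- ===== CLAIM (what is proved, stated in full; the proofs are below) =====
def Claim_equal_create_wall : Prop := ∀ (instructions : List (String × Int × String)), Dom_create_wall instructions → Pre_create_wall instructions → Spec_create_wall instructions (create_wall instructions)

-- ===== LEMMAS AND PROOFS =====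

def addP (p q : Int × Int) : Int × Int := (p.1 + q.1, p.2 + q.2)

lemma scanl_head (c : Int × Int) (l : List (Int × Int)) :
    List.scanl addP c l = c :: (List.scanl addP c l).tail := by
  cases l <;> simp [List.scanl_nil, List.scanl_cons]

lemma wallLoop_eq (w : List (Int × Int)) (c d : Int × Int) (n : Nat) :
    wallLoop (w, c) d n = (w ++ (List.scanl addP c (List.replicate n d)).tail, List.foldl addP c (List.replicate n d)) := by
  induction n generalizing w c with
  | zero => simp [wallLoop]
  | succ n ih =>
    simp [wallLoop, List.replicate_succ, List.scanl_cons, ih, addP]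
    exact (scanl_head _ _).symm

lemma scanl_append_aux (c : Int × Int) (l1 l2 : List (Int × Int)) :
    List.scanl addP c (l1 ++ l2) = List.scanl addP c l1 ++ (List.scanl addP (List.foldl addP c l1) l2).tail := by
  induction l1 generalizing c with
  | nil => cases l2 <;> simp [List.scanl_nil, List.scanl_cons]
  | cons x xs ih => simp [List.scanl_cons, ih]

lemma foldA_eq (instructions : List (String × Int × String))
    (h : Pre_create_wall instructions) (w : List (Int × Int)) (c : Int × Int) :
    instructions.foldl
      (fun st ins =>
        let d := (get_diff ins.1).getD (0, 0)
        wallLoop st d ins.2.1.toNat)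
      (w, c)
    = (w ++ (List.scanl addP c (deltasOf instructions)).tail, List.foldl addP c (deltasOf instructions)) := by
  induction instructions generalizing w c with
  | nil => simp [deltasOf, List.scanl_nil]
  | cons ins rest ih =>
    have hrest : Pre_create_wall rest := fun i hi => h i (List.mem_cons_of_mem _ hi)
    simp only [List.foldl_cons, wallLoop_eq, ih hrest]
    simp [deltasOf, scanl_append_aux, List.foldl_append]

lemma scanLoop_eq (w : List (Int × Int)) (c : Int × Int) (l : List (Int × Int)) :
    scanLoop (w ++ [c]) l = w ++ List.scanl addP c l := by
  induction l generalizing w c with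
  | nil => simp [scanLoop, List.scanl_nil]
  | cons q qs ih =>
    have h1 : (w ++ [c]) ++ [addP c q] = (w ++ [c]) ++ [addP c q] := rfl
    simp only [scanLoop, PySem.List.pyGet?_neg_one_append_singleton, Option.getD_some]
    have := ih (w ++ [c]) (addP c q)
    simp only [addP] at this ⊢
    rw [this]
    simp [List.scanl_cons, addP]

lemma alt_eq (instructions : List (String × Int × String)) :
    create_wall_alt instructions = List.scanl addP (0, 0) (deltasOf instructions) := by
  have := scanLoop_eq [] (0, 0) (deltasOf instructions)
  simpa [create_wall_alt] using this

lemma a_eq (instructions : List (String × Int × String)) (h : Pre_create_wall instructions) :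
    create_wall instructions = List.scanl addP (0, 0) (deltasOf instructions) := by
  unfold create_wall
  rw [foldA_eq instructions h]
  cases hd : deltasOf instructions <;> simp [List.scanl_nil, List.scanl_cons]

-- ===== VERDICT (by name: the statement is the Claim_ definition above) =====
theorem create_wall_spec : Claim_equal_create_wall := by
  intro instructions _ hpre
  unfold Spec_create_wall
  rw [a_eq instructions hpre, alt_eq]
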